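-- pv_equiv track=rewrite | github.com/mahammadkarimovconvitsa/examigrade | examadmin/views.py | _convert_to_15_char_format
-- ===== SOURCE A (Python) =====
-- def _convert_to_15_char_format(semicolon_separated_answer):
--     """
--     Convert semicolon-separated answer back to 15-character format
--     Example: "ac;bd;e" -> "ac   bd   e    "
--     """
--     if not semicolon_separated_answer or semicolon_separated_answer.strip() == '':
--         return '               '  # 15 spaces for empty answer
--
--     choices = semicolon_separated_answer.split(';')
--     formatted_choices = []
--
--     for choice in choices:
--         # Pad each choice to 5 characters
--         formatted_choice = choice.ljust(5)[:5]  # Ensure exactly 5 characters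
--         formatted_choices.append(formatted_choice)
--
--     # Ensure we have exactly 3 choices (padding with empty 5-char strings if needed)
--     while len(formatted_choices) < 3:
--         formatted_choices.append('     ')  # 5 spaces
--
--     # Join and ensure exactly 15 characters
--     result = ''.join(formatted_choices[:3])
--     return result[:15].ljust(15)  # Ensure exactly 15 characters
-- ===== SOURCE B (Python) =====
-- def _convert_to_15_char_format(semicolon_separated_answer):
--     if not semicolon_separated_answer or semicolon_separated_answer.strip() == '':
--         return ' ' * 15
--     buf = [' '] * 15
--     for i, choice in enumerate(semicolon_separated_answer.split(';')[:3]):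
--         for j, ch in enumerate(choice[:5]):
--             buf[i * 5 + j] = ch
--     return ''.join(buf)
-- ===== Notes on version B (the rewrite author's own statement) =====
-- stated objective: simpler
-- what changed: B writes each choice's characters positionally into a preallocated 15-char buffer (enumerate over the first 3 choices, copy up to 5 chars each), replacing A's pad-each-piece, pad-the-list-with-a-while-loop, join, then re-truncate-and-re-pad pipeline.
import Mathlib
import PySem

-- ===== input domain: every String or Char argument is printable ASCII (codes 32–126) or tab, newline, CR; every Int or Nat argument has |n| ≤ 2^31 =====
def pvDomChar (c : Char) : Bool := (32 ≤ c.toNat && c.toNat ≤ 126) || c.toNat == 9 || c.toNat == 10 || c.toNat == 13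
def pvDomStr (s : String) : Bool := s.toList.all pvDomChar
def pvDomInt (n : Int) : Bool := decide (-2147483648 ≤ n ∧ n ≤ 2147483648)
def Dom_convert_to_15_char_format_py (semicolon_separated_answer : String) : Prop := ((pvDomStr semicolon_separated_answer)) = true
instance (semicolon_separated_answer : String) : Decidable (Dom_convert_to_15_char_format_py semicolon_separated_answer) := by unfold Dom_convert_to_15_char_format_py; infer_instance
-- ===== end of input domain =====

-- B formats by splitting and writing each choice's characters positionally into a
-- preallocated 15-char buffer, instead of A's pad-each-piece / pad-the-list / join /
-- re-truncate pipeline; objective: simpler (same cost).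

-- ===== PORT A =====
-- str.ljust(w): pad on the right with spaces to width w
def pvLjust (c : List Char) (w : Nat) : List Char := c ++ List.replicate (w - c.length) ' '

-- the `while len(formatted_choices) < 3: formatted_choices.append('     ')` loop
def pvPadTo3 (l : List (List Char)) : List (List Char) :=
  if l.length < 3 then pvPadTo3 (l ++ [List.replicate 5 ' ']) else l
termination_by 3 - l.length
decreasing_by simp; omega

def convert_to_15_char_format_py (semicolon_separated_answer : String) : String :=
  let cs := semicolon_separated_answer.toList
  if cs = [] ∨ PySem.Chars.strip cs = [] then String.mk (List.replicate 15 ' ')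
  else
    let choices := PySem.Chars.splitOn cs [';']
    let formatted := choices.foldl
      (fun acc choice => acc ++ [PySem.List.slice (pvLjust choice 5) none (some 5)]) []
    let formatted3 := pvPadTo3 formatted
    let result := PySem.Chars.join [] (PySem.List.slice formatted3 none (some 3))
    String.mk (pvLjust (PySem.List.slice result none (some 15)) 15)

-- ===== PORT B =====
def convert_to_15_char_format_py_alt (semicolon_separated_answer : String) : String :=
  let cs := semicolon_separated_answer.toList
  if cs = [] ∨ PySem.Chars.strip cs = [] then String.mk (List.replicate 15 ' ')
  else
    String.mk <|
      (PySem.List.enumerate (PySem.List.slice (PySem.Chars.splitOn cs [';']) none (some 3))).foldl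
        (fun buf p =>
          (PySem.List.enumerate (PySem.List.slice p.2 none (some 5))).foldl
            -- buf[i*5+j] = ch ; the index is provably nonnegative, so .toNat is exact
            (fun b q => b.set (p.1 * 5 + q.1).toNat q.2) buf)
        (List.replicate 15 ' ')

-- ===== PRECONDITION & SPEC =====
def Spec_convert_to_15_char_format_py (semicolon_separated_answer : String) (out : String) : Prop := out = convert_to_15_char_format_py_alt semicolon_separated_answer
instance (semicolon_separated_answer : String) (out : String) : Decidable (Spec_convert_to_15_char_format_py semicolon_separated_answer out) := by unfold Spec_convert_to_15_char_format_py; infer_instance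

-- ===== CLAIM (what is proved, stated in full; the proofs are below) =====
def Claim_equal_convert_to_15_char_format_py : Prop := ∀ (semicolon_separated_answer : String), Dom_convert_to_15_char_format_py semicolon_separated_answer → Spec_convert_to_15_char_format_py semicolon_separated_answer (convert_to_15_char_format_py semicolon_separated_answer)

-- ===== LEMMAS AND PROOFS =====

-- the 5-char cell both programs produce for one choice
def pad5 (c : List Char) : List Char := List.take 5 (pvLjust c 5)

theorem pad5_def (c : List Char) : List.take 5 (pvLjust c 5) = pad5 c := rfl

theorem slice5 (xs : List Char) : PySem.List.slice xs none (some 5) = xs.take 5 := by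
  simp [pysem]

theorem slice3 {α : Type} (xs : List α) : PySem.List.slice xs none (some 3) = xs.take 3 := by
  simp [pysem]

theorem slice15 (xs : List Char) : PySem.List.slice xs none (some 15) = xs.take 15 := by
  simp [pysem]

theorem pad5_eq (c : List Char) :
    pad5 c = c.take 5 ++ List.replicate (5 - c.length) ' ' := by
  unfold pad5 pvLjust
  rw [List.take_append, List.take_replicate]
  simp

theorem length_pad5 (c : List Char) : (pad5 c).length = 5 := by
  rw [pad5_eq]; simp; omega

-- the inner `for j, ch in enumerate(choice[:5])` write loop, fully general
theorem writeLoop (c : List Char) : ∀ (pre suf : List Char) (m : Nat) (base k : Int),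
    c.length ≤ m → 0 ≤ k → base + k = (pre.length : Int) →
    (PySem.List.enumerate c k).foldl (fun b q => b.set (base + q.1).toNat q.2)
      (pre ++ (List.replicate m ' ' ++ suf))
    = pre ++ ((c ++ List.replicate (m - c.length) ' ') ++ suf) := by
  induction c with
  | nil => intro pre suf m base k _ _ _; simp [PySem.List.enumerate]
  | cons x c ih =>
    intro pre suf m base k hm hk hbk
    obtain ⟨m', rfl⟩ : ∃ m', m = m' + 1 := ⟨m - 1, by simp at hm; omega⟩
    rw [PySem.List.enumerate_cons]
    simp only [List.foldl_cons]
    have hset : ((pre ++ (List.replicate (m' + 1) ' ' ++ suf)).set (base + k).toNat x)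
        = (pre ++ [x]) ++ (List.replicate m' ' ' ++ suf) := by
      have h1 : (base + k).toNat = pre.length := by omega
      rw [h1, List.set_append_right _ _ (le_refl _)]
      simp [List.replicate_succ]
    rw [hset, ih (pre ++ [x]) suf m' base (k + 1) (by simp at hm ⊢; omega) (by omega)
      (by simp; omega)]
    simp [List.append_assoc]

-- one slot of B's outer loop
theorem writeSlot (c : List Char) (pre suf : List Char) (base : Int)
    (hb : base = (pre.length : Int)) :
    (PySem.List.enumerate (List.take 5 c)).foldl
      (fun b q => b.set (base + q.1).toNat q.2) (pre ++ (List.replicate 5 ' ' ++ suf))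
    = pre ++ (pad5 c ++ suf) := by
  rw [writeLoop (c.take 5) pre suf 5 base 0 (by simp) (by omega) (by omega), pad5_eq]
  have h : 5 - (List.take 5 c).length = 5 - c.length := by simp; omega
  rw [h]

theorem padTo3_of_le (l : List (List Char)) (h : 3 ≤ l.length) : pvPadTo3 l = l := by
  rw [pvPadTo3, if_neg (by omega)]

theorem rep15_split : List.replicate 15 ' ' = [] ++ (List.replicate 5 ' ' ++ List.replicate 10 ' ') := rfl
theorem rep10_split : List.replicate 10 ' ' = List.replicate 5 ' ' ++ List.replicate 5 ' ' := rfl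

theorem join3 (a b c : List Char) : PySem.Chars.join [] [a, b, c] = a ++ (b ++ c) := by
  simp [PySem.Chars.join, List.intercalate, List.intersperse]

theorem fit15 (x : List Char) (h : x.length = 15) : pvLjust (List.take 15 x) 15 = x := by
  rw [List.take_of_length_le (by omega)]
  simp [pvLjust, h]

-- writing a slot whose buffer ends at the slot (no suffix)
theorem writeSlotLast (c : List Char) (pre : List Char) (base : Int)
    (hb : base = (pre.length : Int)) :
    (PySem.List.enumerate (List.take 5 c)).foldl
      (fun b q => b.set (base + q.1).toNat q.2) (pre ++ List.replicate 5 ' ')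
    = pre ++ pad5 c := by
  have h := writeSlot c pre [] base hb
  simpa using h

-- A's whole non-empty branch equals B's buffer, for any split result L
theorem core (L : List (List Char)) :
    pvLjust (PySem.List.slice (PySem.Chars.join []
      (PySem.List.slice (pvPadTo3 (L.foldl
        (fun acc choice => acc ++ [PySem.List.slice (pvLjust choice 5) none (some 5)]) []))
        none (some 3))) none (some 15)) 15
    = (PySem.List.enumerate (PySem.List.slice L none (some 3))).foldl
        (fun buf p =>
          (PySem.List.enumerate (PySem.List.slice p.2 none (some 5))).foldl
            (fun b q => b.set (p.1 * 5 + q.1).toNat q.2) buf)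
        (List.replicate 15 ' ') := by
  rw [PySem.List.foldl_append_singleton_eq_map]
  simp only [List.nil_append, slice5, pad5_def, slice3, slice15]
  rcases L with _ | ⟨c0, _ | ⟨c1, _ | ⟨c2, rest⟩⟩⟩
  · -- L = []
    have p0 : pvPadTo3 ([] : List (List Char)) =
        [List.replicate 5 ' ', List.replicate 5 ' ', List.replicate 5 ' '] := by
      rw [pvPadTo3, if_pos (by simp), pvPadTo3, if_pos (by simp), pvPadTo3, if_pos (by simp),
        pvPadTo3, if_neg (by simp)]
      simp
    simp only [List.map_nil, p0]
    decide
  · -- L = [c0]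
    have p1 : pvPadTo3 [pad5 c0] = [pad5 c0, List.replicate 5 ' ', List.replicate 5 ' '] := by
      rw [pvPadTo3, if_pos (by simp), pvPadTo3, if_pos (by simp), pvPadTo3, if_neg (by simp)]
      simp
    simp only [List.map_cons, List.map_nil, p1]
    rw [show ([c0] : List (List Char)).take 3 = [c0] from rfl]
    rw [show (PySem.List.enumerate [c0] 0) = [((0 : Int), c0)] from rfl]
    simp only [List.foldl_cons, List.foldl_nil, zero_mul]
    rw [rep15_split, writeSlot c0 [] _ 0 (by simp)]
    rw [show List.take 3 [pad5 c0, List.replicate 5 ' ', List.replicate 5 ' ']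
        = [pad5 c0, List.replicate 5 ' ', List.replicate 5 ' '] from rfl]
    rw [join3, fit15 _ (by simp [length_pad5])]
    simp [rep10_split]
  · -- L = [c0, c1]
    have p2 : pvPadTo3 [pad5 c0, pad5 c1] = [pad5 c0, pad5 c1, List.replicate 5 ' '] := by
      rw [pvPadTo3, if_pos (by simp), pvPadTo3, if_neg (by simp)]
      simp
    simp only [List.map_cons, List.map_nil, p2]
    rw [show ([c0, c1] : List (List Char)).take 3 = [c0, c1] from rfl]
    rw [show (PySem.List.enumerate [c0, c1] 0) = [((0 : Int), c0), ((1 : Int), c1)] from rfl]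
    simp only [List.foldl_cons, List.foldl_nil, zero_mul, one_mul]
    rw [rep15_split, writeSlot c0 [] _ 0 (by simp), List.nil_append, rep10_split,
      writeSlot c1 (pad5 c0) _ 5 (by simp [length_pad5])]
    rw [show List.take 3 [pad5 c0, pad5 c1, List.replicate 5 ' ']
        = [pad5 c0, pad5 c1, List.replicate 5 ' '] from rfl]
    rw [join3, fit15 _ (by simp [length_pad5])]
  · -- L = c0 :: c1 :: c2 :: rest
    rw [padTo3_of_le _ (by simp)]
    rw [show ((c0 :: c1 :: c2 :: rest).map pad5).take 3 = [pad5 c0, pad5 c1, pad5 c2] by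
      simp [List.take_succ_cons]]
    rw [show ((c0 :: c1 :: c2 :: rest)).take 3 = [c0, c1, c2] by simp [List.take_succ_cons]]
    rw [show (PySem.List.enumerate [c0, c1, c2] 0)
        = [((0 : Int), c0), ((1 : Int), c1), ((2 : Int), c2)] from rfl]
    simp only [List.foldl_cons, List.foldl_nil, zero_mul, one_mul]
    rw [rep15_split, writeSlot c0 [] _ 0 (by simp), List.nil_append, rep10_split,
      writeSlot c1 (pad5 c0) _ 5 (by simp [length_pad5]),
      show ((2 : Int) * 5) = 10 from rfl,
      ← List.append_assoc,
      writeSlotLast c2 (pad5 c0 ++ pad5 c1) 10 (by simp [length_pad5])]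
    rw [join3, fit15 _ (by simp [length_pad5]), List.append_assoc]

-- ===== VERDICT (by name: the statement is the Claim_ definition above) =====
theorem convert_to_15_char_format_py_spec : Claim_equal_convert_to_15_char_format_py := by
  intro s _
  unfold Spec_convert_to_15_char_format_py convert_to_15_char_format_py convert_to_15_char_format_py_alt
  simp only []
  split_ifs with h
  · rfl
  · exact congrArg String.mk (core _)
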